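-- pv_equiv track=rewrite | github.com/vladkostikov/HSP | entrance/football.py | swap_two_football_players
-- ===== SOURCE A (Python) =====
-- def swap_two_football_players(footballers: list, sorted_footballers: list) -> bool:
--     new_placement = footballers[:]
--     for i, _footballer in enumerate(footballers[:-1]):
--         if footballers[i] < footballers[i + 1]:
--             continue
--
--         minimum_number_in_the_following_indexes = min(footballers[i + 1:])
--         minimum_number_index = footballers.index(minimum_number_in_the_following_indexes)
--         new_placement[i], new_placement[minimum_number_index] \
--             = new_placement[minimum_number_index], new_placement[i]
--
--         if new_placement == sorted_footballers:
--             return True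
--         new_placement = footballers[:]
--     return False
-- ===== SOURCE B (Python) =====
-- def swap_two_football_players(footballers: list, sorted_footballers: list) -> bool:
--     n = len(footballers)
--     if len(sorted_footballers) != n:
--         return False
--     # suffix minima: suffix_min[k] = min(footballers[k:])
--     suffix_min = [0] * n
--     for k in range(n - 1, -1, -1):
--         m = footballers[k]
--         if k + 1 < n and suffix_min[k + 1] < m:
--             m = suffix_min[k + 1]
--         suffix_min[k] = m
--     # first occurrence index of each value
--     first_index = {}
--     for k, v in enumerate(footballers):
--         first_index.setdefault(v, k)
--     # positions where the two lists disagree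
--     diffs = [k for k in range(n) if footballers[k] != sorted_footballers[k]]
--     if len(diffs) > 2:
--         return False
--     for i in range(n - 1):
--         if footballers[i] < footballers[i + 1]:
--             continue
--         j = first_index[suffix_min[i + 1]]
--         if i == j:
--             if not diffs:
--                 return True
--         elif all(k == i or k == j for k in diffs) \
--                 and sorted_footballers[i] == footballers[j] \
--                 and sorted_footballers[j] == footballers[i]:
--             return True
--     return False
-- ===== Notes on version B (the rewrite author's own statement) =====
-- stated objective: faster
-- what changed: Instead of re-scanning for the suffix minimum, its first index and comparing whole lists for every candidate position, B precomputes suffix minima, a first-occurrence dict and the list of positions where the two inputs differ once, then tests each candidate swap in O(1).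
import Mathlib
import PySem

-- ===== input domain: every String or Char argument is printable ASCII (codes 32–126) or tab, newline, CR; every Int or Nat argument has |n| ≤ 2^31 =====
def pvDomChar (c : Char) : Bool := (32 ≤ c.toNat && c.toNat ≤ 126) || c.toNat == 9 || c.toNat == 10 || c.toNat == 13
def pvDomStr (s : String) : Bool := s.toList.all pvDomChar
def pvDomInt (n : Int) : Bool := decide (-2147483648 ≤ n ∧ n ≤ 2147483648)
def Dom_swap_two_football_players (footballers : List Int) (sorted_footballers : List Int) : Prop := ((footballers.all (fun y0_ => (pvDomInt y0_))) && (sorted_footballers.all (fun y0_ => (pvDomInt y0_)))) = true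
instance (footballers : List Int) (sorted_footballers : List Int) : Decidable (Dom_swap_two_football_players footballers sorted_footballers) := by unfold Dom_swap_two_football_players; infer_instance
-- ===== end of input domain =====

-- B replaces A's per-index min/index scans and full-list comparison by precomputed
-- suffix minima, a first-occurrence dict and the diff-position list, testing each
-- candidate swap in O(1) (objective: faster, O(n^2) -> O(n)).

-- ===== PORT A =====
-- loop of A: for i over range(len(footballers)-1), with early return
def pvAGo (f s : List Int) : List Nat → Bool
  | [] => false
  | i :: rest =>
    if f.getD i 0 < f.getD (i+1) 0 then pvAGo f s rest
    else
      match PySem.List.min? (f.drop (i+1)) (fun y => y) with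
      | none => false          -- unreachable: the slice footballers[i+1:] is nonempty
      | some m =>
        match PySem.List.index? f m with
        | none => false        -- unreachable: m is an element of footballers
        | some j =>
          -- new_placement[i], new_placement[j] = new_placement[j], new_placement[i]
          if (f.set i (f.getD j 0)).set j (f.getD i 0) = s then true
          else pvAGo f s rest

def swap_two_football_players (footballers : List Int) (sorted_footballers : List Int) : Bool :=
  pvAGo footballers sorted_footballers (List.range (footballers.length - 1))

-- ===== PORT B =====
-- suffix_min built from the right: (pvSuffMins f)[k] = min(f[k:])
def pvSuffMins : List Int → List Int
  | [] => []
  | x :: xs =>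
    match pvSuffMins xs with
    | [] => [x]
    | y :: ys => (if y < x then y else x) :: y :: ys

-- first_index dict: setdefault(v, k) for k, v in enumerate(footballers)
def pvBuildFirst : Nat → List Int → PySem.Dict Int Nat → PySem.Dict Int Nat
  | _, [], d => d
  | k, v :: rest, d => pvBuildFirst (k+1) rest (if d.contains v then d else d.insert v k)

-- body of B's loop: O(1) test of the candidate swap (i, j); next = the rest of the loop
def pvBStep (f s : List Int) (diffs : List Nat) (i j : Nat) (next : Bool) : Bool :=
  if i = j then
    (if diffs.isEmpty then true else next)
  else if diffs.all (fun k => k == i || k == j)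
          && (s.getD i 0 == f.getD j 0) && (s.getD j 0 == f.getD i 0) then true
  else next

-- main loop of B: j = first_index[suffix_min[i+1]]
def pvBGo (f s sm : List Int) (fi : PySem.Dict Int Nat) (diffs : List Nat) : List Nat → Bool
  | [] => false
  | i :: rest =>
    if f.getD i 0 < f.getD (i+1) 0 then pvBGo f s sm fi diffs rest
    else pvBStep f s diffs i (fi.getD (sm.getD (i+1) 0) 0) (pvBGo f s sm fi diffs rest)

def swap_two_football_players_alt (footballers : List Int) (sorted_footballers : List Int) : Bool :=
  if sorted_footballers.length ≠ footballers.length then false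
  else
    let sm := pvSuffMins footballers
    let fi := pvBuildFirst 0 footballers PySem.Dict.empty
    let diffs := (List.range footballers.length).filter
      (fun k => footballers.getD k 0 ≠ sorted_footballers.getD k 0)
    if diffs.length > 2 then false
    else pvBGo footballers sorted_footballers sm fi diffs (List.range (footballers.length - 1))

-- ===== PRECONDITION & SPEC =====
def Spec_swap_two_football_players (footballers : List Int) (sorted_footballers : List Int) (out : Bool) : Prop := out = swap_two_football_players_alt footballers sorted_footballers
instance (footballers : List Int) (sorted_footballers : List Int) (out : Bool) : Decidable (Spec_swap_two_football_players footballers sorted_footballers out) := by unfold Spec_swap_two_football_players; infer_instance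

-- ===== CLAIM (what is proved, stated in full; the proofs are below) =====
def Claim_equal_swap_two_football_players : Prop := ∀ (footballers : List Int) (sorted_footballers : List Int), Dom_swap_two_football_players footballers sorted_footballers → Spec_swap_two_football_players footballers sorted_footballers (swap_two_football_players footballers sorted_footballers)

-- ===== LEMMAS AND PROOFS =====

-- pvSuffMins computes Python's min of every suffix
theorem pvSuffMins_length (f : List Int) : (pvSuffMins f).length = f.length := by
  induction f with
  | nil => rfl
  | cons x xs ih =>
    unfold pvSuffMins
    cases h : pvSuffMins xs with
    | nil =>
      rw [h] at ih
      simp only [List.length_nil, List.length_cons] at ih ⊢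
      omega
    | cons y ys =>
      rw [h] at ih
      simp only [List.length_cons] at ih ⊢
      omega

theorem pvSuffMins_head (f : List Int) (hf : f ≠ []) :
    PySem.List.min? f (fun y => y) = some ((pvSuffMins f).headD 0) := by
  induction f with
  | nil => exact absurd rfl hf
  | cons x xs ih =>
    cases xs with
    | nil => simp [PySem.List.min?_id_cons, pvSuffMins]
    | cons z zs =>
      have hxs : (z :: zs : List Int) ≠ [] := by simp
      have hy := ih hxs
      obtain ⟨M, hM⟩ : ∃ M, PySem.List.min? (x :: z :: zs) (fun y => y) = some M := by
        cases hM : PySem.List.min? (x :: z :: zs) (fun y => y) with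
        | none => rw [PySem.List.min?_eq_none_iff] at hM; simp at hM
        | some M => exact ⟨M, rfl⟩
      set y : Int := (pvSuffMins (z :: zs)).headD 0 with hydef
      have hymem : y ∈ (z :: zs : List Int) := PySem.List.min?_mem hy
      have hymin := PySem.List.min?_isMin hy
      have hMmem : M ∈ (x :: z :: zs : List Int) := PySem.List.min?_mem hM
      have hMmin := PySem.List.min?_isMin hM
      have hne : pvSuffMins (z :: zs) ≠ [] := by
        intro h0
        have := pvSuffMins_length (z :: zs)
        rw [h0] at this; simp at this
      have hgoal : (pvSuffMins (x :: z :: zs)).headD 0 = if y < x then y else x := by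
        unfold pvSuffMins
        cases h : pvSuffMins (z :: zs) with
        | nil => exact absurd h hne
        | cons y0 ys => rw [hydef, h]; simp
      rw [hM, hgoal]
      congr 1
      have h1 : M ≤ (if y < x then y else x) := by
        split
        · exact hMmin y (by simp [hymem])
        · exact hMmin x (by simp)
      have h2 : (if y < x then y else x) ≤ M := by
        rcases (List.mem_cons.mp hMmem) with hMx | hMtl
        · subst hMx; split <;> omega
        · have := hymin M hMtl
          split <;> omega
      omega

theorem pvSuffMins_getD (f : List Int) (k : Nat) (hk : k < f.length) :
    PySem.List.min? (f.drop k) (fun y => y) = some ((pvSuffMins f).getD k 0) := by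
  induction f generalizing k with
  | nil => simp at hk
  | cons x xs ih =>
    cases k with
    | zero =>
      rw [List.drop_zero, pvSuffMins_head (x :: xs) (by simp)]
      congr 1
      cases h : pvSuffMins (x :: xs) with
      | nil =>
        have := pvSuffMins_length (x :: xs)
        rw [h] at this; simp at this
      | cons a t => simp
    | succ k =>
      have hk' : k < xs.length := by simp at hk; omega
      rw [List.drop_succ_cons, ih k hk']
      have hstep : pvSuffMins (x :: xs) =
          match pvSuffMins xs with
          | [] => [x]
          | y :: ys => (if y < x then y else x) :: y :: ys := rfl
      cases h : pvSuffMins xs with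
      | nil =>
        have hlen := pvSuffMins_length xs
        rw [h] at hlen
        simp only [List.length_nil] at hlen
        omega
      | cons y ys =>
        rw [hstep, h]
        simp

-- the first-occurrence dict computes list.index
theorem pvBuildFirst_get? (l : List Int) (k0 : Nat) (d : PySem.Dict Int Nat) (v : Int) :
    (pvBuildFirst k0 l d).get? v =
      ((d.get? v).or ((PySem.List.index? l v).map (· + k0))) := by
  induction l generalizing k0 d with
  | nil => simp [pvBuildFirst, PySem.List.index?_eq_idxOf?]
  | cons w rest ih =>
    unfold pvBuildFirst
    rw [ih]
    by_cases hv : v = w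
    · subst hv
      rw [PySem.List.index?_cons_self]
      by_cases hc : d.contains v = true
      · have hsome : (d.get? v).isSome := by
          rw [← PySem.Dict.contains_eq_isSome_get?]; exact hc
        obtain ⟨u, hu⟩ := Option.isSome_iff_exists.mp hsome
        simp [hc, hu]
      · have hnone : d.get? v = none := by
          rcases h : d.get? v with _ | u
          · rfl
          · exfalso; apply hc
            rw [PySem.Dict.contains_eq_isSome_get?, h]; rfl
        simp [hc, hnone, PySem.Dict.get?_insert_self]
    · have hwv : w ≠ v := fun h => hv h.symm
      rw [PySem.List.index?_cons_of_ne rest hwv]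
      have hd' : (if d.contains w = true then d else d.insert w k0).get? v = d.get? v := by
        split
        · rfl
        · exact PySem.Dict.get?_insert_of_ne _ _ hv
      rw [hd', Option.map_map]
      congr 2
      funext t
      simp; omega

theorem pvBuildFirst_getD (f : List Int) (v : Int) (j : Nat)
    (h : PySem.List.index? f v = some j) :
    (pvBuildFirst 0 f PySem.Dict.empty).getD v 0 = j := by
  rw [PySem.Dict.getD_eq_get?_getD, pvBuildFirst_get?, h]
  simp [PySem.Dict.get?_empty]

-- the O(1) swap test equals the full-list comparison
theorem pvEqSwap (f s : List Int) (i j : Nat) (hs : s.length = f.length)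
    (hi : i < f.length) (hj : j < f.length) :
    ((f.set i (f.getD j 0)).set j (f.getD i 0) = s) ↔
      ((∀ k, k < f.length → f.getD k 0 ≠ s.getD k 0 → (k = i ∨ k = j)) ∧
       s.getD i 0 = f.getD j 0 ∧ s.getD j 0 = f.getD i 0) := by
  have hnp : ∀ k, k < f.length →
      ((f.set i (f.getD j 0)).set j (f.getD i 0)).getD k 0 =
        if j = k then f.getD i 0 else if i = k then f.getD j 0 else f.getD k 0 := by
    intro k hk
    have hk1 : k < ((f.set i (f.getD j 0)).set j (f.getD i 0)).length := by simpa using hk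
    rw [List.getD_eq_getElem _ _ hk1, List.getElem_set]
    by_cases hjk : j = k
    · rw [if_pos hjk, if_pos hjk]
    · rw [if_neg hjk, if_neg hjk, List.getElem_set]
      by_cases hik : i = k
      · rw [if_pos hik, if_pos hik]
      · rw [if_neg hik, if_neg hik]
        exact (List.getD_eq_getElem f 0 hk).symm
  constructor
  · intro h
    have hpt : ∀ k, k < f.length → s.getD k 0 =
        (if j = k then f.getD i 0 else if i = k then f.getD j 0 else f.getD k 0) := by
      intro k hk
      rw [← h, hnp k hk]
    refine ⟨?_, ?_, ?_⟩
    · intro k hk hne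
      by_contra hcon
      have hki : k ≠ i := fun h => hcon (Or.inl h)
      have hkj : k ≠ j := fun h => hcon (Or.inr h)
      have := hpt k hk
      rw [if_neg (fun hh => hkj hh.symm), if_neg (fun hh => hki hh.symm)] at this
      exact hne this.symm
    · have := hpt i hi
      by_cases hji : j = i
      · rw [if_pos hji] at this; rw [this, hji]
      · rw [if_neg hji, if_pos rfl] at this; exact this
    · have := hpt j hj
      rw [if_pos rfl] at this; exact this
  · rintro ⟨hall, hsi, hsj⟩
    have hlen : ((f.set i (f.getD j 0)).set j (f.getD i 0)).length = s.length := by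
      simp [hs]
    apply List.ext_getElem hlen
    intro k h1 h2
    have hk : k < f.length := by simpa using h1
    have hks : k < s.length := h2
    rw [← List.getD_eq_getElem _ _ h1, ← List.getD_eq_getElem _ _ h2, hnp k hk]
    split
    · rename_i hjk; rw [← hjk]; exact hsj.symm
    · split
      · rename_i hik; rw [← hik]; exact hsi.symm
      · rename_i hjk hik
        by_contra hne
        rcases hall k hk (fun hh => hne hh) with h' | h'
        · exact hik h'.symm
        · exact hjk h'.symm

-- a Nodup list inside {i, j} has at most two elements
theorem pvNodupLe2 (l : List Nat) (i j : Nat) (hn : l.Nodup)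
    (h : ∀ k ∈ l, k = i ∨ k = j) : l.length ≤ 2 := by
  rcases l with _ | ⟨a, _ | ⟨b, _ | ⟨c, t⟩⟩⟩
  · simp
  · simp
  · simp
  · exfalso
    have ha := h a (by simp)
    have hb := h b (by simp)
    have hc := h c (by simp)
    simp [List.nodup_cons] at hn
    obtain ⟨⟨hab, hac, _⟩, ⟨hbc, _⟩, _⟩ := hn
    rcases ha with rfl | rfl <;> rcases hb with rfl | rfl <;> rcases hc with rfl | rfl <;>
      simp_all

-- A returns False when the lengths differ
theorem pvAGo_len (f s : List Int) (hlen : s.length ≠ f.length) :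
    ∀ idx, pvAGo f s idx = false := by
  intro idx
  induction idx with
  | nil => rfl
  | cons i rest ih =>
    rw [pvAGo]
    split
    · exact ih
    · split
      · rfl
      · split
        · rfl
        · rw [if_neg, ih]
          intro he
          apply hlen
          rw [← he]; simp

-- A returns False when more than two positions differ
theorem pvAGo_big (f s : List Int) (hs : s.length = f.length)
    (hd : ((List.range f.length).filter
            (fun k => f.getD k 0 ≠ s.getD k 0)).length > 2) :
    ∀ idx, (∀ i ∈ idx, i + 1 < f.length) → pvAGo f s idx = false := by
  intro idx
  induction idx with
  | nil => intro _; rfl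
  | cons i rest ih =>
    intro hmem
    have hi1 : i + 1 < f.length := hmem i (by simp)
    have hrest : ∀ i ∈ rest, i + 1 < f.length := fun a ha => hmem a (by simp [ha])
    rw [pvAGo]
    split
    · exact ih hrest
    · split
      next => rfl
      next m hmin =>
        split
        next => rfl
        next j hjdx =>
          have hj : j < f.length := (PySem.List.getElem_of_index?_eq_some hjdx).1
          rw [if_neg, ih hrest]
          intro he
          have hall := ((pvEqSwap f s i j hs (by omega) hj).mp he).1
          have hle := pvNodupLe2
            ((List.range f.length).filter (fun k => f.getD k 0 ≠ s.getD k 0)) i j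
            (List.nodup_range.filter (fun k => decide (f.getD k 0 ≠ s.getD k 0)))
            (by
              intro k hk
              rw [List.mem_filter, List.mem_range] at hk
              refine hall k hk.1 ?_
              have := hk.2
              simp only [decide_eq_true_eq] at this
              exact this)
          omega

-- the two loops agree index by index
theorem pvLoopEq (f s : List Int) (hs : s.length = f.length)
    (hd : ((List.range f.length).filter
            (fun k => f.getD k 0 ≠ s.getD k 0)).length ≤ 2) :
    ∀ idx, (∀ i ∈ idx, i + 1 < f.length) →
      pvAGo f s idx =
        pvBGo f s (pvSuffMins f) (pvBuildFirst 0 f PySem.Dict.empty)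
          ((List.range f.length).filter (fun k => f.getD k 0 ≠ s.getD k 0)) idx := by
  intro idx
  induction idx with
  | nil => intro _; rfl
  | cons i rest ih =>
    intro hmem
    have hi1 : i + 1 < f.length := hmem i (by simp)
    have hrest : ∀ i ∈ rest, i + 1 < f.length := fun a ha => hmem a (by simp [ha])
    rw [pvAGo, pvBGo]
    split
    · exact ih hrest
    · -- the candidate: m = min of suffix, j = its first index
      split
      next hmin =>
        exfalso
        rw [PySem.List.min?_eq_none_iff] at hmin
        have : (f.drop (i + 1)).length = 0 := by rw [hmin]; rfl
        rw [List.length_drop] at this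
        omega
      next M hmin =>
      have hM : M = (pvSuffMins f).getD (i + 1) 0 := by
        have h2 := pvSuffMins_getD f (i + 1) hi1
        rw [hmin] at h2
        exact Option.some_injective _ h2
      have hMmem : M ∈ f := List.mem_of_mem_drop (PySem.List.min?_mem hmin)
      split
      next hjdx =>
        exfalso
        rw [PySem.List.index?_eq_none_iff] at hjdx
        exact hjdx hMmem
      next j hjdx =>
      have hj : j < f.length := (PySem.List.getElem_of_index?_eq_some hjdx).1
      have hfi : (pvBuildFirst 0 f PySem.Dict.empty).getD ((pvSuffMins f).getD (i + 1) 0) 0 = j := by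
        rw [← hM]
        exact pvBuildFirst_getD f M j hjdx
      rw [hfi, pvBStep]
      set diffs := (List.range f.length).filter (fun k => f.getD k 0 ≠ s.getD k 0) with hdiffs
      have heqswap := pvEqSwap f s i j hs (by omega) hj
      have hdiff_char : ∀ k, k ∈ diffs ↔ (k < f.length ∧ f.getD k 0 ≠ s.getD k 0) := by
        intro k
        rw [hdiffs, List.mem_filter, List.mem_range]
        simp
      by_cases hij : i = j
      · -- identity swap: succeeds iff f = s, i.e. diffs is empty
        subst hij
        rw [if_pos rfl]
        have hiff : ((f.set i (f.getD i 0)).set i (f.getD i 0) = s) ↔ diffs = [] := by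
          rw [heqswap]
          constructor
          · rintro ⟨hall, hsi, _⟩
            rcases hde : diffs with _ | ⟨k, t⟩
            · rfl
            · exfalso
              have hk : k ∈ diffs := by rw [hde]; simp
              rw [hdiff_char] at hk
              have := hall k hk.1 hk.2
              have hki : k = i := by tauto
              subst hki
              exact hk.2 hsi.symm
          · intro hde
            have hnd : ∀ k, k < f.length → f.getD k 0 = s.getD k 0 := by
              intro k hk
              by_contra hne
              have : k ∈ diffs := (hdiff_char k).mpr ⟨hk, hne⟩
              rw [hde] at this; simp at this
            exact ⟨fun k hk hne => absurd (hnd k hk) hne,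
              (hnd i (by omega)).symm, (hnd i (by omega)).symm⟩
        by_cases hde : diffs = []
        · rw [if_pos (hiff.mpr hde), hde]; rfl
        · rw [if_neg (fun hh => hde (hiff.mp hh))]
          have : diffs.isEmpty = false := by
            rcases diffs with _ | _
            · exact absurd rfl hde
            · rfl
          rw [this]
          simp only [Bool.false_eq_true, if_false]
          exact ih hrest
      · -- a genuine swap: the O(1) test
        rw [if_neg hij]
        have hcond : (diffs.all (fun k => k == i || k == j)
              && (s.getD i 0 == f.getD j 0) && (s.getD j 0 == f.getD i 0)) = true ↔
            ((∀ k, k < f.length → f.getD k 0 ≠ s.getD k 0 → (k = i ∨ k = j)) ∧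
             s.getD i 0 = f.getD j 0 ∧ s.getD j 0 = f.getD i 0) := by
          rw [Bool.and_eq_true, Bool.and_eq_true, List.all_eq_true]
          constructor
          · rintro ⟨⟨hall, h1⟩, h2⟩
            refine ⟨?_, by simpa using h1, by simpa using h2⟩
            intro k hk hne
            have := hall k ((hdiff_char k).mpr ⟨hk, hne⟩)
            simpa using this
          · rintro ⟨hall, h1, h2⟩
            refine ⟨⟨?_, by simpa using h1⟩, by simpa using h2⟩
            intro k hk
            rw [hdiff_char] at hk
            have := hall k hk.1 hk.2
            simpa using this
        by_cases hp : ((∀ k, k < f.length → f.getD k 0 ≠ s.getD k 0 → (k = i ∨ k = j)) ∧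
             s.getD i 0 = f.getD j 0 ∧ s.getD j 0 = f.getD i 0)
        · rw [if_pos (heqswap.mpr hp), if_pos (hcond.mpr hp)]
        · rw [if_neg (fun hh => hp (heqswap.mp hh))]
          have : (diffs.all (fun k => k == i || k == j)
              && (s.getD i 0 == f.getD j 0) && (s.getD j 0 == f.getD i 0)) = false := by
            by_contra hc
            rw [Bool.not_eq_false] at hc
            exact hp (hcond.mp hc)
          rw [this]
          simp only [Bool.false_eq_true, if_false]
          exact ih hrest

-- ===== VERDICT (by name: the statement is the Claim_ definition above) =====
theorem swap_two_football_players_spec : Claim_equal_swap_two_football_players := by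
  unfold Claim_equal_swap_two_football_players Spec_swap_two_football_players
  intro f s _
  unfold swap_two_football_players swap_two_football_players_alt
  by_cases hlen : s.length = f.length
  · rw [if_neg (by simp [hlen])]
    have hmem : ∀ i ∈ List.range (f.length - 1), i + 1 < f.length := by
      intro i hi
      have := List.mem_range.mp hi
      omega
    by_cases hd : ((List.range f.length).filter
        (fun k => f.getD k 0 ≠ s.getD k 0)).length > 2
    · rw [if_pos hd]
      exact pvAGo_big f s hlen hd _ hmem
    · rw [if_neg hd]
      exact pvLoopEq f s hlen (by omega) _ hmem
  · rw [if_pos (fun hh => hlen hh)]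
    exact pvAGo_len f s hlen _
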